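-- pv_equiv track=rewrite | github.com/percebus/leetcode-excercises | problems/meta/practice/reverse_to_make_equal.py | are_they_similar
-- ===== SOURCE A (Python) =====
-- def are_they_similar(array_a: list, array_b: list) -> bool:
--     if array_a == array_b:
--         return True
--
--     length_a = len(array_a)
--     lenght_b = len(array_b)
--     if length_a != lenght_b:
--         raise Exception(f'mismtaching lengths: {length_a} VS {lenght_b}')
--
--     for i in range(length_a):
--         left = array_b[:i]
--         for j in range(i + 1, lenght_b):
--             mid = array_b[i: j + 1]
--             right = array_b[j + 1: lenght_b]
--             reversed = mid[::-1]
--             new_array = left + reversed + right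
--             if array_a == new_array:
--                 return True
--
--     return False
-- ===== SOURCE B (Python) =====
-- def are_they_similar(array_a: list, array_b: list) -> bool:
--     if array_a == array_b:
--         return True
--
--     diffs = [k for k in range(len(array_a)) if array_a[k] != array_b[k]]
--     i, j = diffs[0], diffs[-1]
--     return all(array_a[k] == array_b[i + j - k] for k in range(i, j + 1))
-- ===== Notes on version B (the rewrite author's own statement) =====
-- stated objective: faster
-- what changed: Instead of trying every (i,j) subarray reversal of array_b and rebuilding/comparing whole arrays (O(n^3)), B locates the first and last differing positions in one pass and checks that single segment is a mirror of the other array (O(n)).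
import Mathlib
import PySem

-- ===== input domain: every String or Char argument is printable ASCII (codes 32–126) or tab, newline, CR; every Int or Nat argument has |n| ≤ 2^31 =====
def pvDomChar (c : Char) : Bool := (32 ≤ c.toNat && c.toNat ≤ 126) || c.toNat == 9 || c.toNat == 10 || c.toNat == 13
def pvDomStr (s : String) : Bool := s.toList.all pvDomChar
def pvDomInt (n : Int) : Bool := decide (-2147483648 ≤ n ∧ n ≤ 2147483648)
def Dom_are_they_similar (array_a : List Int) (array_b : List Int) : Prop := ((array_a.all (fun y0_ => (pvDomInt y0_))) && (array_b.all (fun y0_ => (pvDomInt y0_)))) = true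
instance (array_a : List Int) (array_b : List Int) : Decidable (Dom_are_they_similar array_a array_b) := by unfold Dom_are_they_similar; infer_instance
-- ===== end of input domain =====

-- B replaces A's triple-nested try-every-reversal scan by a single pass locating the first and
-- last differing indices and one mirror check of that segment (objective: faster, asymptotic).


-- ===== PORT A =====
-- Literal transliteration of A: the early `array_a == array_b` test; the mismatching-lengths
-- branch raises Exception in Python (excluded by Pre_; the port returns false there); the
-- nested for-loops with early `return True` become nested `.any` over the same ranges,
-- building left / mid / right / reversed by the same slices (mid[::-1] is the slice
-- xs[::-1], ported via PySem.List.slice?).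
def are_they_similar (array_a : List Int) (array_b : List Int) : Bool :=
  if array_a == array_b then true
  else
    let length_a : Int := array_a.length
    let lenght_b : Int := array_b.length
    if length_a ≠ lenght_b then false   -- Python: raise Exception (outside Pre_)
    else
      (PySem.List.pyRange 0 length_a 1).any (fun i =>
        let left := PySem.List.slice array_b none (some i)
        (PySem.List.pyRange (i + 1) lenght_b 1).any (fun j =>
          let mid := PySem.List.slice array_b (some i) (some (j + 1))
          let right := PySem.List.slice array_b (some (j + 1)) (some lenght_b)
          let revd := (PySem.List.slice? mid none none (-1)).getD []
          let new_array := left ++ revd ++ right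
          array_a == new_array))

-- ===== PORT B =====
-- Literal transliteration of Source B: the diffs comprehension over range(len(array_a)), then
-- diffs[0] / diffs[-1] (which raise IndexError in Python only when diffs == [], impossible
-- inside Pre_ once array_a ≠ array_b; pyGetD's default stands in for that unreachable case),
-- then the single mirror check `all(...)` over range(i, j + 1).
def are_they_similar_alt (array_a : List Int) (array_b : List Int) : Bool :=
  if array_a == array_b then true
  else
    let diffs := (PySem.List.pyRange 0 (array_a.length : Int) 1).filter
      (fun k => !(PySem.List.pyGetD array_a k 0 == PySem.List.pyGetD array_b k 0))
    let i := PySem.List.pyGetD diffs 0 0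
    let j := PySem.List.pyGetD diffs (-1) 0
    (PySem.List.pyRange i (j + 1) 1).all
      (fun k => PySem.List.pyGetD array_a k 0 == PySem.List.pyGetD array_b (i + j - k) 0)

-- ===== PRECONDITION & SPEC =====
-- A raises Exception exactly when the two lists have different lengths (equal lists always
-- have equal lengths), so Pre_ admits precisely the inputs on which A returns.
def Pre_are_they_similar (array_a : List Int) (array_b : List Int) : Prop :=
  array_a.length = array_b.length
instance (array_a : List Int) (array_b : List Int) : Decidable (Pre_are_they_similar array_a array_b) := by unfold Pre_are_they_similar; infer_instance
def pvWitness_are_they_similar : List Int × List Int := ([1, 2, 3], [1, 3, 2])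

def Spec_are_they_similar (array_a : List Int) (array_b : List Int) (out : Bool) : Prop := out = are_they_similar_alt array_a array_b
instance (array_a : List Int) (array_b : List Int) (out : Bool) : Decidable (Spec_are_they_similar array_a array_b out) := by unfold Spec_are_they_similar; infer_instance

-- ===== CLAIM (what is proved, stated in full; the proofs are below) =====
def Claim_equal_are_they_similar : Prop := ∀ (array_a : List Int) (array_b : List Int), Dom_are_they_similar array_a array_b → Pre_are_they_similar array_a array_b → Spec_are_they_similar array_a array_b (are_they_similar array_a array_b)

-- ===== LEMMAS AND PROOFS =====

-- `a` is `b` with the window [i, j] reversed, stated pointwise: the mirror part …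
def pvMirror (a b : List Int) (i j : Nat) : Prop :=
  ∀ k : Nat, i ≤ k → k ≤ j → a.getD k 0 = b.getD (i + j - k) 0

-- … and the untouched part outside the window
def pvOutside (a b : List Int) (i j : Nat) : Prop :=
  ∀ k : Nat, k < a.length → (k < i ∨ j < k) → a.getD k 0 = b.getD k 0

theorem eq_iff_getD (a c : List Int) (h : a.length = c.length) :
    a = c ↔ ∀ k, k < a.length → a.getD k 0 = c.getD k 0 := by
  constructor
  · rintro rfl k hk; rfl
  · intro hk
    apply List.ext_getElem h
    intro i h1 h2
    have := hk i h1
    rwa [List.getD_eq_getElem a 0 h1, List.getD_eq_getElem c 0 h2] at this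

-- entry k of A's rebuilt array left ++ reversed ++ right
theorem sandwich_getD (b : List Int) (i j k : Nat) (hij : i < j) (hj : j < b.length) (hk : k < b.length) :
    ((b.take i ++ ((b.drop i).take (j + 1 - i)).reverse) ++ b.drop (j + 1)).getD k 0 =
      if k < i then b.getD k 0 else if k ≤ j then b.getD (i + j - k) 0 else b.getD k 0 := by
  have hT : (b.take i).length = i := by simp; omega
  have hM : ((b.drop i).take (j + 1 - i)).length = j + 1 - i := by simp; omega
  have hR : (((b.drop i).take (j + 1 - i)).reverse).length = j + 1 - i := by simp [hM]
  have hTR : (b.take i ++ ((b.drop i).take (j + 1 - i)).reverse).length = j + 1 := by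
    simp [hT, hR]; omega
  by_cases h1 : k < i
  · rw [List.getD_append _ _ _ _ (by omega), List.getD_append _ _ _ _ (by omega)]
    rw [List.getD_eq_getElem _ _ (by simp [hT]; omega), List.getD_eq_getElem _ _ (by omega)]
    simp only [List.getElem_take, if_pos h1]
  · by_cases h2 : k ≤ j
    · rw [List.getD_append _ _ _ _ (by omega), List.getD_append_right _ _ _ _ (by omega), hT]
      rw [List.getD_eq_getElem _ _ (by rw [hR]; omega)]
      rw [List.getElem_reverse]
      simp only [List.getElem_take, List.getElem_drop, hM]
      rw [List.getD_eq_getElem _ _ (show i + j - k < b.length by omega)]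
      simp only [if_neg h1, if_pos h2]
      congr 1
      omega
    · rw [List.getD_append_right _ _ _ _ (by omega), hTR]
      rw [List.getD_eq_getElem _ _ (by simp; omega), List.getD_eq_getElem _ _ (by omega)]
      simp only [List.getElem_drop]
      simp only [if_neg h1, if_neg h2]
      congr 1
      omega

-- A's per-window equality test, characterised as mirror-inside + equal-outside
theorem sandwich_iff (a b : List Int) (h : a.length = b.length) (i j : Nat) (hij : i < j) (hj : j < a.length) :
    (a = (b.take i ++ ((b.drop i).take (j + 1 - i)).reverse) ++ b.drop (j + 1)) ↔
      pvOutside a b i j ∧ pvMirror a b i j := by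
  have hlen : ((b.take i ++ ((b.drop i).take (j + 1 - i)).reverse) ++ b.drop (j + 1)).length = a.length := by
    simp; omega
  rw [eq_iff_getD _ _ hlen.symm]
  constructor
  · intro hk
    constructor
    · intro k hkn hout
      have := hk k hkn
      rw [sandwich_getD b i j k hij (by omega) (by omega)] at this
      rcases hout with h' | h'
      · simpa [if_pos h'] using this
      · rw [if_neg (by omega), if_neg (by omega)] at this; exact this
    · intro k hik hkj
      have := hk k (by omega)
      rw [sandwich_getD b i j k hij (by omega) (by omega)] at this
      rw [if_neg (by omega), if_pos hkj] at this; exact this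
  · rintro ⟨ho, hm⟩ k hkn
    rw [sandwich_getD b i j k hij (by omega) (by omega)]
    by_cases h1 : k < i
    · rw [if_pos h1]; exact ho k hkn (Or.inl h1)
    · by_cases h2 : k ≤ j
      · rw [if_neg h1, if_pos h2]; exact hm k (by omega) h2
      · rw [if_neg h1, if_neg h2]; exact ho k hkn (Or.inr (by omega))

-- what A's nested any-loops compute, as an existential over Nat window bounds
theorem A_char (a b : List Int) (h : a.length = b.length) (hne : a ≠ b) :
    are_they_similar a b = true ↔
      ∃ i j : Nat, i < j ∧ j < a.length ∧
        a = (b.take i ++ ((b.drop i).take (j + 1 - i)).reverse) ++ b.drop (j + 1) := by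
  unfold are_they_similar
  rw [if_neg (by simp [hne])]
  simp only
  rw [if_neg (by simp [h]), List.any_eq_true]
  constructor
  · rintro ⟨i, himem, hinner⟩
    rw [PySem.List.mem_pyRange_one] at himem
    obtain ⟨hi0, hin⟩ := himem
    rw [List.any_eq_true] at hinner
    obtain ⟨j, hjmem, heq⟩ := hinner
    rw [PySem.List.mem_pyRange_one] at hjmem
    obtain ⟨hji, hjn⟩ := hjmem
    rw [beq_iff_eq] at heq
    refine ⟨i.toNat, j.toNat, by omega, by omega, ?_⟩
    rw [PySem.List.slice_to b hi0, PySem.List.slice_toNat b hi0 (by omega),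
        PySem.List.slice_toNat b (by omega) (by positivity),
        PySem.List.slice?_none_none_neg_one] at heq
    have e2 : (j + 1).toNat = j.toNat + 1 := by omega
    rw [e2] at heq
    have e3 : ((b.length : Int)).toNat = b.length := by omega
    rw [e3] at heq
    rw [List.take_of_length_le (show (b.drop (j.toNat+1)).length ≤ b.length - (j.toNat + 1) by simp)] at heq
    simpa using heq
  · rintro ⟨i0, j0, hij, hjn, heq⟩
    refine ⟨(i0 : Int), ?_, ?_⟩
    · rw [PySem.List.mem_pyRange_one]; omega
    · rw [List.any_eq_true]
      refine ⟨(j0 : Int), ?_, ?_⟩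
      · rw [PySem.List.mem_pyRange_one]; constructor <;> [omega; omega]
      · rw [beq_iff_eq]
        rw [PySem.List.slice_to b (by positivity), PySem.List.slice_toNat b (by positivity) (by positivity),
            PySem.List.slice_toNat b (by positivity) (by positivity),
            PySem.List.slice?_none_none_neg_one]
        have e2 : ((j0 : Int) + 1).toNat = j0 + 1 := by omega
        have e3 : ((b.length : Int)).toNat = b.length := by omega
        rw [e2, e3]
        rw [List.take_of_length_le (show (b.drop (j0+1)).length ≤ b.length - (j0 + 1) by simp)]
        simpa using heq

-- the shrink induction: any agreeing reversal window can be narrowed to one whose two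
-- endpoints genuinely differ
theorem pvShrink (a b : List Int) (h : a.length = b.length) (hne : a ≠ b) :
    ∀ d i j, j + 1 - i ≤ d → j < a.length → pvOutside a b i j → pvMirror a b i j →
      ∃ i0 j0 : Nat, i0 < j0 ∧ j0 < a.length ∧
        a.getD i0 0 ≠ b.getD i0 0 ∧ a.getD j0 0 ≠ b.getD j0 0 ∧
        pvOutside a b i0 j0 ∧ pvMirror a b i0 j0 := by
  intro d
  induction d with
  | zero =>
    intro i j hd hj ho hm
    exact absurd ((eq_iff_getD a b h).mpr (fun k hk => ho k hk (by omega))) hne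
  | succ d ih =>
    intro i j hd hj ho hm
    by_cases hij : j < i
    · exact absurd ((eq_iff_getD a b h).mpr (fun k hk => ho k hk (by omega))) hne
    · rw [Nat.not_lt] at hij
      by_cases hi : a.getD i 0 = b.getD i 0
      · have hbij : b.getD i 0 = b.getD j 0 := by
          have := hm i (le_refl i) hij
          simp only [Nat.add_sub_cancel_left] at this
          omega
        have haj : a.getD j 0 = b.getD j 0 := by
          have := hm j hij (le_refl j)
          have e : i + j - j = i := by omega
          rw [e] at this
          omega
        by_cases hij' : i = j
        · subst hij'
          refine absurd ((eq_iff_getD a b h).mpr (fun k hk => ?_)) hne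
          by_cases hke : k = i
          · subst hke; exact hi
          · exact ho k hk (by omega)
        · have ho' : pvOutside a b (i + 1) (j - 1) := by
            intro k hk hout
            by_cases hk1 : k = i
            · subst hk1; exact hi
            · by_cases hk2 : k = j
              · subst hk2; exact haj
              · exact ho k hk (by omega)
          have hm' : pvMirror a b (i + 1) (j - 1) := by
            intro k h1 h2
            have := hm k (by omega) (by omega)
            have e : i + j - k = (i + 1) + (j - 1) - k := by omega
            rw [e] at this
            exact this
          exact ih (i + 1) (j - 1) (by omega) (by omega) ho' hm'
      · by_cases hjd : a.getD j 0 = b.getD j 0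
        · exfalso
          have h1 := hm j hij (le_refl j)
          have e : i + j - j = i := by omega
          rw [e] at h1
          have h2 := hm i (le_refl i) hij
          simp only [Nat.add_sub_cancel_left] at h2
          exact hi (by omega)
        · refine ⟨i, j, ?_, hj, hi, hjd, ho, hm⟩
          rcases Nat.lt_or_ge i j with h' | h'
          · exact h'
          · exfalso
            have hii : i = j := by omega
            subst hii
            have := hm i (le_refl i) (le_refl i)
            have e : i + i - i = i := by omega
            rw [e] at this
            exact hi this

-- the last element of a strictly increasing list bounds every element
theorem pvLeGetLast (l : List Int) (hp : l.Pairwise (· < ·)) (hne : l ≠ []) :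
    ∀ y ∈ l, y ≤ l.getLast hne := by
  induction l with
  | nil => cases hne rfl
  | cons x t ih =>
    intro y hy
    cases t with
    | nil =>
      simp at hy
      simp [hy]
    | cons z s =>
      rw [List.getLast_cons (by simp)]
      rcases List.mem_cons.mp hy with rfl | hyt
      · have hx := (List.pairwise_cons.mp hp).1
        have := hx ((z :: s).getLast (by simp)) (List.getLast_mem _)
        omega
      · exact ih (List.pairwise_cons.mp hp).2 (by simp) y hyt

theorem pvMain (a b : List Int) (h : a.length = b.length) :
    are_they_similar a b = are_they_similar_alt a b := by
  by_cases hab : a = b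
  · subst hab
    unfold are_they_similar are_they_similar_alt
    simp
  · rw [Bool.eq_iff_iff, A_char a b h hab]
    unfold are_they_similar_alt
    rw [if_neg (by simpa using hab)]
    simp only
    set diffsT := (PySem.List.pyRange 0 (a.length : Int) 1).filter
      (fun k => !(PySem.List.pyGetD a k 0 == PySem.List.pyGetD b k 0)) with hdT
    have hmem : ∀ x : Int, x ∈ diffsT ↔
        0 ≤ x ∧ x < (a.length : Int) ∧ a.getD x.toNat 0 ≠ b.getD x.toNat 0 := by
      intro x
      rw [hdT, List.mem_filter, PySem.List.mem_pyRange_one]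
      constructor
      · rintro ⟨⟨h0, h1⟩, hp⟩
        rw [PySem.List.pyGetD_of_nonneg a 0 h0, PySem.List.pyGetD_of_nonneg b 0 h0] at hp
        refine ⟨h0, h1, ?_⟩
        simpa using hp
      · rintro ⟨h0, h1, hne2⟩
        refine ⟨⟨h0, h1⟩, ?_⟩
        rw [PySem.List.pyGetD_of_nonneg a 0 h0, PySem.List.pyGetD_of_nonneg b 0 h0]
        simpa using hne2
    have hpw : diffsT.Pairwise (· < ·) := by
      rw [hdT]
      exact List.Pairwise.filter _ (PySem.List.pairwise_lt_pyRange_one 0 _)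
    have hdne : diffsT ≠ [] := by
      intro h0
      apply hab
      apply (eq_iff_getD a b h).mpr
      intro k hk
      by_contra hkne
      have hmemk : (k : Int) ∈ diffsT := (hmem _).mpr ⟨by positivity, by exact_mod_cast hk, by simpa using hkne⟩
      rw [h0] at hmemk
      cases hmemk
    obtain ⟨i, t, hd⟩ : ∃ i t, diffsT = i :: t := by
      cases hdc : diffsT with
      | nil => exact absurd hdc hdne
      | cons x s => exact ⟨x, s, rfl⟩
    rw [hd] at hmem hpw ⊢
    rw [PySem.List.pyGetD_zero_cons, PySem.List.pyGetD_neg_one _ 0 (show i :: t ≠ [] by simp)]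
    set J := (i :: t).getLast (by simp) with hJ
    have hImem : i ∈ i :: t := List.mem_cons_self ..
    have hJmem : J ∈ i :: t := List.getLast_mem _
    have hImin : ∀ y ∈ i :: t, i ≤ y := by
      intro y hy
      rcases List.mem_cons.mp hy with rfl | hyt
      · exact le_refl y
      · exact le_of_lt ((List.pairwise_cons.mp hpw).1 y hyt)
    have hJmax : ∀ y ∈ i :: t, y ≤ J := pvLeGetLast _ hpw (by simp)
    have hIprop := (hmem i).mp hImem
    have hJprop := (hmem J).mp hJmem
    set i0 := i.toNat with hi0
    set j0 := J.toNat with hj0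
    have ei : (i0 : Int) = i := Int.toNat_of_nonneg hIprop.1
    have ej : (j0 : Int) = J := Int.toNat_of_nonneg hJprop.1
    constructor
    · rintro ⟨i1, j1, hij1, hjn1, heq⟩
      rw [sandwich_iff a b h i1 j1 hij1 hjn1] at heq
      obtain ⟨ho, hm⟩ := heq
      obtain ⟨i2, j2, hij2, hj2n, hdi, hdj, ho2, hm2⟩ :=
        pvShrink a b h hab (j1 + 1 - i1) i1 j1 le_rfl hjn1 ho hm
      have hi2mem : (i2 : Int) ∈ i :: t :=
        (hmem _).mpr ⟨by positivity, by exact_mod_cast (by omega : i2 < a.length), by simpa using hdi⟩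
      have hj2mem : (j2 : Int) ∈ i :: t :=
        (hmem _).mpr ⟨by positivity, by exact_mod_cast hj2n, by simpa using hdj⟩
      have e1 : i = (i2 : Int) := by
        have h1 : i ≤ (i2 : Int) := hImin _ hi2mem
        have h2 : ¬ (i0 < i2) := fun hlt =>
          hIprop.2.2 (ho2 i0 (by omega) (Or.inl hlt))
        omega
      have e2 : J = (j2 : Int) := by
        have h1 : (j2 : Int) ≤ J := hJmax _ hj2mem
        have h2 : ¬ (j2 < j0) := fun hlt =>
          hJprop.2.2 (ho2 j0 (by omega) (Or.inr hlt))
        omega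
      rw [e1, e2, List.all_eq_true]
      intro k hk
      rw [PySem.List.mem_pyRange_one] at hk
      have hk0 : 0 ≤ k := by omega
      rw [PySem.List.pyGetD_of_nonneg a 0 hk0, PySem.List.pyGetD_of_nonneg b 0 (by omega)]
      rw [beq_iff_eq]
      have hmk := hm2 k.toNat (by omega) (by omega)
      have e3 : ((i2 : Int) + (j2 : Int) - k).toNat = i2 + j2 - k.toNat := by omega
      rw [e3]
      exact hmk
    · intro hall
      rw [List.all_eq_true] at hall
      have hm0 : pvMirror a b i0 j0 := by
        intro k h1 h2
        have hkmem : (k : Int) ∈ PySem.List.pyRange i (J + 1) 1 :=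
          PySem.List.mem_pyRange_one.mpr ⟨by omega, by omega⟩
        have := hall _ hkmem
        rw [PySem.List.pyGetD_of_nonneg a 0 (by positivity),
            PySem.List.pyGetD_of_nonneg b 0 (by omega), beq_iff_eq] at this
        have e : ((k : Int)).toNat = k := by omega
        have e2 : (i + J - (k : Int)).toNat = i0 + j0 - k := by omega
        rw [e, e2] at this
        exact this
      have ho0 : pvOutside a b i0 j0 := by
        intro k hkn hout
        by_contra hc
        have hkmem : (k : Int) ∈ i :: t :=
          (hmem _).mpr ⟨by positivity, by exact_mod_cast hkn, by simpa using hc⟩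
        have l1 := hImin _ hkmem
        have l2 := hJmax _ hkmem
        omega
      have hle : i ≤ J := hImin _ hJmem
      have hij0 : i0 < j0 := by
        by_contra hge
        have heq0 : i0 = j0 := by omega
        have := hm0 i0 (le_refl i0) (by omega)
        rw [show i0 + j0 - i0 = i0 from by omega] at this
        exact hIprop.2.2 this
      have hj0n : j0 < a.length := by omega
      exact ⟨i0, j0, hij0, hj0n, (sandwich_iff a b h i0 j0 hij0 hj0n).mpr ⟨ho0, hm0⟩⟩

-- ===== VERDICT (by name: the statement is the Claim_ definition above) =====
theorem are_they_similar_spec : Claim_equal_are_they_similar := by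
  intro a b _ hpre
  unfold Spec_are_they_similar
  exact pvMain a b hpre
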